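-- pv_equiv track=rewrite | github.com/dremocanu-lab/bloodwork-os-mvp | backend/app/services/lab_catalog.py | group_rows_by_category
-- ===== SOURCE A (Python) =====
-- from typing import Any
--
-- CATEGORY_ORDER = [
--     "Hematologie",
--     "Coagulare",
--     "Biochimie generala",
--     "Endocrinologie",
--     "Imunologie",
--     "Markeri tumorali",
--     "Biologie moleculara generala",
--     "Microbiologie",
--     "Alte analize",
-- ]
--
-- def group_rows_by_category(rows: list[dict[str, Any]]) -> dict[str, list[dict[str, Any]]]:
--     grouped: dict[str, list[dict[str, Any]]] = {}
--
--     for row in rows or []: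
--         category = row.get("category") or "Alte analize"
--         grouped.setdefault(category, []).append(row)
--
--     return {
--         category: grouped[category]
--         for category in sorted(
--             grouped.keys(),
--             key=lambda item: CATEGORY_ORDER.index(item) if item in CATEGORY_ORDER else 999,
--         )
--     }
-- ===== SOURCE B (Python) =====
-- from typing import Any
--
-- CATEGORY_ORDER = [
--     "Hematologie",
--     "Coagulare",
--     "Biochimie generala",
--     "Endocrinologie",
--     "Imunologie",
--     "Markeri tumorali",
--     "Biologie moleculara generala",
--     "Microbiologie",
--     "Alte analize",
-- ]
--
-- def group_rows_by_category(rows: list[dict[str, Any]]) -> dict[str, list[dict[str, Any]]]: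
--     grouped: dict[str, list[dict[str, Any]]] = {}
--     for row in rows or []:
--         category = row.get("category") or "Alte analize"
--         if category in grouped:
--             grouped[category].append(row)
--         else:
--             grouped[category] = [row]
--     # No comparison sort: emit known categories in CATEGORY_ORDER order,
--     # then unknown categories in first-seen order.
--     result: dict[str, list[dict[str, Any]]] = {}
--     for category in CATEGORY_ORDER:
--         if category in grouped:
--             result[category] = grouped[category]
--     for category, items in grouped.items():
--         if category not in CATEGORY_ORDER:
--             result[category] = items
--     return result
-- ===== Notes on version B (the rewrite author's own statement) =====
-- stated objective: simpler
-- what changed: B drops A's sorted(..., key=CATEGORY_ORDER.index) comparison sort and instead emits the grouped categories in two plain passes: first the fixed CATEGORY_ORDER list for known categories, then the grouped dict in first-seen order for unknown ones.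
import Mathlib
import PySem

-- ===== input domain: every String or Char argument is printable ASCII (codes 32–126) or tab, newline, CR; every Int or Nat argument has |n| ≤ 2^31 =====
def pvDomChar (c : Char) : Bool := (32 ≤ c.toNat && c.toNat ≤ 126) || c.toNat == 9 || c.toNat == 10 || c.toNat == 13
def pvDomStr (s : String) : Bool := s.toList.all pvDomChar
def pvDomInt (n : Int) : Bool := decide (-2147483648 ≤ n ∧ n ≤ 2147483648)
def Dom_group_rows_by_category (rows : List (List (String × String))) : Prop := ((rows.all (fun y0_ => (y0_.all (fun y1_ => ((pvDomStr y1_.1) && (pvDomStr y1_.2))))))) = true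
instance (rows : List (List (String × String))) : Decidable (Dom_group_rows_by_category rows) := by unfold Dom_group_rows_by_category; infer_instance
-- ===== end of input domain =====

-- B replaces A's sorted(..., key=CATEGORY_ORDER.index) call by two plain passes (fixed order, then
-- first-seen order for unknown categories); same return value, no comparison sort. Objective: simpler.

def CATEGORY_ORDER : List String :=
  ["Hematologie", "Coagulare", "Biochimie generala", "Endocrinologie", "Imunologie",
   "Markeri tumorali", "Biologie moleculara generala", "Microbiologie", "Alte analize"]

-- row.get("category") or "Alte analize"  (falsy = missing key or empty string)
def pvRowCat (row : List (String × String)) : String :=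
  match (PySem.Dict.mk row).get? "category" with
  | some s => if s = "" then "Alte analize" else s
  | none => "Alte analize"

-- ===== PORT A =====
-- key=lambda item: CATEGORY_ORDER.index(item) if item in CATEGORY_ORDER else 999
def pvKey (item : String) : Int :=
  if CATEGORY_ORDER.contains item then (((PySem.List.index? CATEGORY_ORDER item).getD 0 : Nat) : Int)
  else 999

def group_rows_by_category (rows : List (List (String × String))) : List (String × List (List (String × String))) :=
  let grouped := rows.foldl
    (fun d row => d.modify (pvRowCat row) [] (fun l => l ++ [row])) PySem.Dict.empty
  (PySem.List.sorted grouped.keys pvKey false).map (fun c => (c, grouped.getD c []))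

-- ===== PORT B =====
def group_rows_by_category_alt (rows : List (List (String × String))) : List (String × List (List (String × String))) :=
  let grouped := rows.foldl
    (fun d row =>
      let c := pvRowCat row
      if d.contains c then d.modify c [] (fun l => l ++ [row]) else d.insert c [row])
    PySem.Dict.empty
  let res := CATEGORY_ORDER.foldl
    (fun acc c => if grouped.contains c then acc ++ [(c, grouped.getD c [])] else acc) []
  grouped.items.foldl
    (fun acc kv => if CATEGORY_ORDER.contains kv.1 then acc else acc ++ [kv]) res

-- ===== PRECONDITION & SPEC =====
def Spec_group_rows_by_category (rows : List (List (String × String))) (out : List (String × List (List (String × String)))) : Prop := out = group_rows_by_category_alt rows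
instance (rows : List (List (String × String))) (out : List (String × List (List (String × String)))) : Decidable (Spec_group_rows_by_category rows out) := by unfold Spec_group_rows_by_category; infer_instance

-- ===== CLAIM (what is proved, stated in full; the proofs are below) =====
def Claim_equal_group_rows_by_category : Prop := ∀ (rows : List (List (String × String))), Dom_group_rows_by_category rows → Spec_group_rows_by_category rows (group_rows_by_category rows)

-- ===== LEMMAS AND PROOFS =====

def pvBefore (a b : String) : Bool := decide (pvKey a < pvKey b)

-- insertBy puts x at the front when x goes before every element
lemma insertBy_front {α : Type} (before : α → α → Bool) (x : α) (ys : List α)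
    (h : ∀ y ∈ ys, before x y = true) :
    PySem.List.insertBy before x ys = x :: ys := by
  cases ys with
  | nil => rfl
  | cons y ys => simp [PySem.List.insertBy, h y (by simp)]

lemma pairwise_before_CATEGORY_ORDER :
    CATEGORY_ORDER.Pairwise (fun a b => pvBefore a b = true ∧ pvBefore b a = false) := by
  decide

lemma pvKey_of_not_mem (y : String) (h : CATEGORY_ORDER.contains y = false) : pvKey y = 999 := by
  unfold pvKey
  rw [h]
  simp

lemma pvKey_lt_of_mem : ∀ x ∈ CATEGORY_ORDER, pvKey x < 999 := by decide

lemma pvKey_le (y : String) : pvKey y ≤ 999 := by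
  unfold pvKey
  split
  · rename_i h
    rw [PySem.List.index?_eq_idxOf?]
    cases hi : List.idxOf? y CATEGORY_ORDER with
    | none => simp
    | some i =>
      obtain ⟨hlt, -⟩ := List.idxOf?_eq_some_iff.mp hi
      have h9 : i < 9 := by simpa [CATEGORY_ORDER] using hlt
      simp
      omega
  · omega

-- inserting a known element into (filtered base ++ tail of later elements)
lemma insertBy_filter (x : String) (p : String → Bool) :
    ∀ (L t : List String), L.Pairwise (fun a b => pvBefore a b = true ∧ pvBefore b a = false) →
    x ∈ L → p x = false → (∀ y ∈ t, pvBefore x y = true) →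
    PySem.List.insertBy pvBefore x (L.filter p ++ t) = L.filter (fun c => p c || c == x) ++ t := by
  intro L
  induction L with
  | nil => intro t _ hx; exact absurd hx (by simp)
  | cons a L ih =>
    intro t hpw hx hpx ht
    rw [List.pairwise_cons] at hpw
    obtain ⟨ha, hpwL⟩ := hpw
    rcases List.mem_cons.mp hx with rfl | hxL
    · -- x is the head; x ∉ L (pairwise would contradict), and x goes before everything filtered
      have hxnotL : x ∉ L := by
        intro hmem
        have h1 := (ha x hmem).1
        have h2 := (ha x hmem).2
        rw [h1] at h2
        simp at h2
      rw [List.filter_cons_of_neg (by simp [hpx]), List.filter_cons_of_pos (by simp)]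
      have hL : L.filter (fun c => p c || c == x) = L.filter p := by
        apply List.filter_congr
        intro c hc
        have : c ≠ x := fun h => hxnotL (h ▸ hc)
        simp [this]
      rw [hL]
      apply insertBy_front
      intro y hy
      rcases List.mem_append.mp hy with hy | hy
      · exact (ha y (List.mem_of_mem_filter hy)).1
      · exact ht y hy
    · by_cases hpa : p a = true
      · rw [List.filter_cons_of_pos hpa, List.filter_cons_of_pos (by simp [hpa])]
        have hba : pvBefore x a = false := (ha x hxL).2
        simp only [List.cons_append, PySem.List.insertBy, hba]
        simp only [Bool.false_eq_true, if_false]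
        rw [ih t hpwL hxL hpx ht]
      · have hax : (a == x) = false := by
          have hne : a ≠ x := by
            rintro rfl
            have h1 := (ha _ hxL).1
            simp [pvBefore] at h1
          exact beq_eq_false_iff_ne.mpr hne
        rw [List.filter_cons_of_neg (by simp [hpa]), List.filter_cons_of_neg (by simp [hpa, hax])]
        exact ih t hpwL hxL hpx ht

-- the insertion-sort loop of sorted(): the invariant
lemma foldl_insertBy_inv :
    ∀ (ks p : List String), (p ++ ks).Nodup →
    ks.foldl (fun acc x => PySem.List.insertBy pvBefore x acc)
      (CATEGORY_ORDER.filter (p.contains ·) ++ p.filter (fun c => !CATEGORY_ORDER.contains c))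
    = CATEGORY_ORDER.filter ((p ++ ks).contains ·) ++ (p ++ ks).filter (fun c => !CATEGORY_ORDER.contains c) := by
  intro ks
  induction ks with
  | nil => intro p _; simp
  | cons x ks ih =>
    intro p hnd
    have hxp : x ∉ p := by
      intro h
      exact ((List.nodup_append.mp hnd).2.2 x h x List.mem_cons_self) rfl
    have hstep : PySem.List.insertBy pvBefore x
        (CATEGORY_ORDER.filter (p.contains ·) ++ p.filter (fun c => !CATEGORY_ORDER.contains c))
        = CATEGORY_ORDER.filter ((p ++ [x]).contains ·) ++ (p ++ [x]).filter (fun c => !CATEGORY_ORDER.contains c) := by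
      by_cases hx : CATEGORY_ORDER.contains x = true
      · have hxmem : x ∈ CATEGORY_ORDER := by simpa using hx
        rw [insertBy_filter x (p.contains ·) CATEGORY_ORDER
              (p.filter (fun c => !CATEGORY_ORDER.contains c))
              pairwise_before_CATEGORY_ORDER hxmem (by simpa using hxp)
              (by
                intro y hy
                have hy' : CATEGORY_ORDER.contains y = false := by
                  have := List.of_mem_filter hy
                  simpa using this
                simp [pvBefore, pvKey_of_not_mem y hy', pvKey_lt_of_mem x hxmem])]
        congr 1
        · apply List.filter_congr
          intro c _
          by_cases hcx : c = x <;> simp [hcx]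
        · rw [List.filter_append]
          simp [hxmem]
      · have hx' : CATEGORY_ORDER.contains x = false := by simpa using hx
        rw [PySem.List.insertBy_of_forall_not_before _ _ _
              (by
                intro y _
                have := pvKey_le y
                simp only [pvBefore, pvKey_of_not_mem x hx']
                simp
                omega)]
        rw [List.append_assoc]
        congr 1
        · apply List.filter_congr
          intro c hc
          have hcx : c ≠ x := by
            rintro rfl
            rw [List.contains_eq_mem] at hx'
            simp at hx'
            exact hx' hc
          simp [hcx]
        · rw [List.filter_append]
          have hnm : x ∉ CATEGORY_ORDER := by simpa using hx'
          simp [hnm]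
    rw [List.foldl_cons, hstep, ih (p ++ [x]) (by simpa using hnd)]
    simp

theorem group_rows_by_category_spec : Claim_equal_group_rows_by_category := by
  intro rows _
  show group_rows_by_category rows = group_rows_by_category_alt rows
  have hfun : (fun (d : PySem.Dict String (List (List (String × String)))) row =>
      let c := pvRowCat row
      if d.contains c then d.modify c [] (fun l => l ++ [row]) else d.insert c [row])
      = (fun d row => d.modify (pvRowCat row) [] (fun l => l ++ [row])) := by
    funext d row
    by_cases h : d.contains (pvRowCat row) = true
    · simp [h]
    · have h' : d.contains (pvRowCat row) = false := by simpa using h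
      simp [h', PySem.Dict.modify, PySem.Dict.getD_of_not_contains]
  unfold group_rows_by_category group_rows_by_category_alt
  simp only [hfun]
  set G := rows.foldl (fun d row => d.modify (pvRowCat row) [] (fun l => l ++ [row]))
      PySem.Dict.empty with hG
  have hnd : G.keys.Nodup := by
    rw [hG]
    exact PySem.Dict.nodup_keys_foldl_modify_key rows pvRowCat []
      (fun _ row => (· ++ [row])) PySem.Dict.empty PySem.Dict.nodup_keys_empty
  have hs : PySem.List.sorted G.keys pvKey false
      = CATEGORY_ORDER.filter (G.keys.contains ·)
        ++ G.keys.filter (fun c => !CATEGORY_ORDER.contains c) := by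
    have h := foldl_insertBy_inv G.keys [] (by simpa using hnd)
    simpa [PySem.List.sorted_eq_foldl_insertBy, pvBefore] using h
  rw [hs, List.map_append]
  rw [PySem.List.foldl_append_if (fun c => G.contains c) (fun c => (c, G.getD c [])) CATEGORY_ORDER []]
  have hflip : (fun (acc : List (String × List (List (String × String)))) kv =>
      if CATEGORY_ORDER.contains kv.1 then acc else acc ++ [kv])
      = (fun acc kv => if (!CATEGORY_ORDER.contains kv.1) = true then acc ++ [id kv] else acc) := by
    funext acc kv
    cases h : CATEGORY_ORDER.contains kv.1 <;> simp_all
  rw [hflip, PySem.List.foldl_append_if]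
  rw [PySem.Dict.items_eq_map_keys G hnd [], List.filter_map, List.map_map]
  have hc : ∀ c, G.contains c = G.keys.contains c := by
    intro c
    rw [Bool.eq_iff_iff]
    simp [PySem.Dict.contains_iff_mem_keys]
  simp only [List.nil_append, Function.comp_def, id_eq]
  congr 1
  exact congrArg _ (List.filter_congr (fun c _ => (hc c).symm))
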